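-- pv_equiv track=rewrite | github.com/ZiyangYE/verilog_UDP | udp_test.py | rotate_port
-- ===== SOURCE A (Python) =====
-- def rotate_port(port: int, min_port: int, max_port: int) -> int:
--     width = max_port - min_port + 1
--     # Keep src/recv adjacent and odd/even relationship stable.
--     nxt = port + 2
--     while nxt > max_port - 1:
--         nxt -= width
--     if nxt < min_port:
--         nxt = min_port
--     return nxt
-- ===== SOURCE B (Python) =====
-- def rotate_port(port: int, min_port: int, max_port: int) -> int:
--     width = max_port - min_port + 1
--     nxt = port + 2
--     if nxt > max_port - 1:
--         # one modular reduction instead of repeated subtraction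
--         nxt = max_port - 1 - (max_port - 1 - nxt) % width
--     return nxt if nxt >= min_port else min_port
-- ===== Notes on version B (the rewrite author's own statement) =====
-- stated objective: simpler
-- what changed: replaces the repeated-subtraction while loop with a single closed-form modular reduction; Pre_ excludes inputs where width <= 0 and port+2 > max_port-1, on which A's while loop never terminates
import Mathlib
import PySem

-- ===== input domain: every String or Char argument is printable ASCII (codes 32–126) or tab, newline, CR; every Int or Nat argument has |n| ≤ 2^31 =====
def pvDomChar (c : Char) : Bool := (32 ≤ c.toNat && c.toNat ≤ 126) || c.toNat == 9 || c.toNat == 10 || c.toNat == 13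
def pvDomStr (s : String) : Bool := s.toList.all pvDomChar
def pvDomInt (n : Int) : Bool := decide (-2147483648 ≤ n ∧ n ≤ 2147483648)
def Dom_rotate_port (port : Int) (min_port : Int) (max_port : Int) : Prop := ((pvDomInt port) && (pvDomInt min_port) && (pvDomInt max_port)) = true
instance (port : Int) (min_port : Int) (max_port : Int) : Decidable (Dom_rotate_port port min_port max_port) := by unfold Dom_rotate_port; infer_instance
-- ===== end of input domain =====

-- B replaces A's repeated-subtraction while loop by one closed-form modular reduction.

-- ===== PORT A =====
-- A's while loop: 'while nxt > max_port - 1: nxt -= width'.  The '1 ≤ width' conjunct in the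
-- guard is a totality guard only (when width ≤ 0 and the guard holds the Python loop diverges;
-- those inputs are excluded by Pre_ below): on every input admitted by Pre_ this recursion takes
-- exactly the iterations the Python loop takes.
def rotateLoopA (maxp width nxt : Int) : Int :=
  if _h : maxp - 1 < nxt ∧ 1 ≤ width then rotateLoopA maxp width (nxt - width) else nxt
  termination_by (nxt - (maxp - 1)).toNat
  decreasing_by omega

def rotate_port (port : Int) (min_port : Int) (max_port : Int) : Int :=
  let width := max_port - min_port + 1
  let nxt := rotateLoopA max_port width (port + 2)
  if nxt < min_port then min_port else nxt

-- ===== PORT B =====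
def rotate_port_alt (port : Int) (min_port : Int) (max_port : Int) : Int :=
  let width := max_port - min_port + 1
  let nxt := port + 2
  let nxt2 := if nxt > max_port - 1 then max_port - 1 - PySem.Int.mod (max_port - 1 - nxt) width else nxt
  if nxt2 ≥ min_port then nxt2 else min_port

-- ===== PRECONDITION & SPEC =====
-- Pre_ excludes exactly the inputs where width = max_port - min_port + 1 ≤ 0 and the loop guard
-- port + 2 > max_port - 1 holds initially: there A's while loop never terminates (Python diverges).
def Pre_rotate_port (port : Int) (min_port : Int) (max_port : Int) : Prop :=
  port + 2 ≤ max_port - 1 ∨ min_port ≤ max_port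
instance (port : Int) (min_port : Int) (max_port : Int) : Decidable (Pre_rotate_port port min_port max_port) := by unfold Pre_rotate_port; infer_instance

def pvWitness_rotate_port : Int × Int × Int := (5000, 4000, 4010)

def Spec_rotate_port (port : Int) (min_port : Int) (max_port : Int) (out : Int) : Prop := out = rotate_port_alt port min_port max_port
instance (port : Int) (min_port : Int) (max_port : Int) (out : Int) : Decidable (Spec_rotate_port port min_port max_port out) := by unfold Spec_rotate_port; infer_instance

-- ===== CLAIM (what is proved, stated in full; the proofs are below) =====
def Claim_equal_rotate_port : Prop := ∀ (port : Int) (min_port : Int) (max_port : Int), Dom_rotate_port port min_port max_port → Pre_rotate_port port min_port max_port → Spec_rotate_port port min_port max_port (rotate_port port min_port max_port)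

-- ===== LEMMAS AND PROOFS =====

-- When the guard holds and width is positive, the loop computes the largest value
-- ≤ maxp - 1 that is congruent to nxt modulo width.
theorem rotateLoopA_eq (maxp width : Int) (hw : 1 ≤ width) :
    ∀ nxt : Int, maxp - 1 < nxt →
      rotateLoopA maxp width nxt = maxp - 1 - (maxp - 1 - nxt) % width := by
  suffices H : ∀ (k : Nat) (n : Int), (n - (maxp - 1)).toNat ≤ k → maxp - 1 < n →
      rotateLoopA maxp width n = maxp - 1 - (maxp - 1 - n) % width by
    exact fun nxt hgt => H _ nxt le_rfl hgt
  intro k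
  induction k with
  | zero => intro n hk hgt; omega
  | succ k ih =>
    intro n hk hgt
    rw [rotateLoopA]
    simp only [hgt, hw, and_self, dite_true]
    by_cases h2 : maxp - 1 < n - width
    · rw [ih (n - width) (by omega) h2]
      have hmod : (maxp - 1 - (n - width)) % width = (maxp - 1 - n) % width := by
        have he : maxp - 1 - (n - width) = (maxp - 1 - n) + 1 * width := by ring
        rw [he, Int.add_mul_emod_self_right]
      rw [hmod]
    · rw [rotateLoopA]
      simp only [h2, false_and, dite_false]
      have h1 : (maxp - 1 - n + 1 * width) % width = maxp - 1 - n + 1 * width :=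
        Int.emod_eq_of_lt (by omega) (by omega)
      have h2' : (maxp - 1 - n) % width = (maxp - 1 - n + 1 * width) % width :=
        (Int.add_mul_emod_self_right _ 1 width).symm
      omega

theorem rotateLoopA_stop (maxp width nxt : Int) (h : ¬ maxp - 1 < nxt) :
    rotateLoopA maxp width nxt = nxt := by
  rw [rotateLoopA]; simp [h]

-- ===== VERDICT (by name: the statement is the Claim_ definition above) =====
theorem rotate_port_spec : Claim_equal_rotate_port := by
  intro port min_port max_port _ hpre
  simp only [Spec_rotate_port, rotate_port, rotate_port_alt]
  by_cases hg : max_port - 1 < port + 2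
  · have hw : 1 ≤ max_port - min_port + 1 := by
      rcases hpre with h | h <;> omega
    rw [rotateLoopA_eq _ _ hw _ hg,
        PySem.Int.mod_eq_emod_of_pos (by omega)]
    have hmn : 0 ≤ (max_port - 1 - (port + 2)) % (max_port - min_port + 1) :=
      Int.emod_nonneg _ (by omega)
    have hmx : (max_port - 1 - (port + 2)) % (max_port - min_port + 1) < max_port - min_port + 1 :=
      Int.emod_lt_of_pos _ (by omega)
    simp only [hg, if_true]
    split_ifs <;> omega
  · rw [rotateLoopA_stop _ _ _ hg]
    simp only [hg, if_false]
    split_ifs <;> omega
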